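-- pv_equiv track=rewrite | github.com/yec3168/algorithm | programmers/lv_1/모의고사.py | solution
-- ===== SOURCE A (Python) =====
-- def solution(answers):
--     result_list =[]
--     first_student = [1, 2, 3, 4, 5]
--     second_student = [2, 1, 2, 3, 2, 4, 2, 5]
--     third_student = [3, 3, 1, 1, 2, 2, 4, 4 ,5, 5]
--     one = two = three = 0
--
--     for answer in range(len(answers)):
--         if answers[answer] == first_student[(answer+5)%5]:
--             one +=1
--         if answers[answer] == second_student[(answer+8)%8]:
--             two +=1
--         if answers[answer] == third_student[(answer+10)%10]:
--             three +=1
--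
--     answer_dict = { "1" : one,
--                     "2" : two,
--                     "3" : three }
--
--     answer_dict = sorted(answer_dict.items(), key = lambda x : (x[1]), reverse=True)
--     if answer_dict[0][1] == 0:
--         return result_list
--
--     temp =[]
--     temp.append(list(answer_dict[0]))
--     for i in range(1,len(answer_dict)):
--         if temp[i-1][1] == answer_dict[i][1]:
--             temp.append(list(answer_dict[i]))
--         else:
--             break
--
--     for i in temp:
--         result_list.append(int(i[0]))
--     return result_list
-- ===== SOURCE B (Python) =====
-- def solution(answers):
--     # All three pattern periods (5, 8, 10) divide 40, so an answer's match status
--     # depends only on (position mod 40, value). Build that histogram in one pass,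
--     # then score each student by 40 table lookups instead of per-element matching.
--     freq = {}
--     for i, a in enumerate(answers):
--         k = (i % 40, a)
--         freq[k] = freq.get(k, 0) + 1
--     patterns = [[1, 2, 3, 4, 5],
--                 [2, 1, 2, 3, 2, 4, 2, 5],
--                 [3, 3, 1, 1, 2, 2, 4, 4, 5, 5]]
--     scores = [sum(freq.get((r, p[r % len(p)]), 0) for r in range(40))
--               for p in patterns]
--     best = max(scores)
--     if best == 0:
--         return []
--     return [k + 1 for k in range(3) if scores[k] == best]
-- ===== Notes on version B (the rewrite author's own statement) =====
-- stated objective: alternative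
-- what changed: B builds a (position mod 40, value) frequency dictionary in one pass (40 = lcm of the pattern periods), scores each student by 40 table lookups against his pattern instead of matching every answer, and returns the tied max scorers via max+filter instead of A's string-keyed dict, descending sort and tie-walking break loop.
import Mathlib
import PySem

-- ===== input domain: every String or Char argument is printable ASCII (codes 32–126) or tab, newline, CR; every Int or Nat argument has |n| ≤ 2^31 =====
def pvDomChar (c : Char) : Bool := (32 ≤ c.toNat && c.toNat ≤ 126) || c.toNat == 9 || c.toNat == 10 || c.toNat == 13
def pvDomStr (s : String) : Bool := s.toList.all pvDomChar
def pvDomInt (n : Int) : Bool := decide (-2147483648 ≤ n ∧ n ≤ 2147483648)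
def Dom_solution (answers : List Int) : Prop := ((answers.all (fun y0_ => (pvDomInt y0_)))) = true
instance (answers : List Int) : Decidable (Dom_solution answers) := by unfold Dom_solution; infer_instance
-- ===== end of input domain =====

set_option maxRecDepth 4000


-- B replaces A's per-element pattern matching by a (position mod 40, value) frequency
-- dictionary scored with 40 lookups per student, and A's dict+sort+break tail by max+filter
-- (objective: alternative; same asymptotic cost).

-- ===== PORT A =====
-- A's 'for i in range(1,len(answer_dict))' loop, whose 'break' becomes returning temp
def solutionTempLoop (ad : List (String × Int)) (temp : List (String × Int)) :
    List Int → List (String × Int)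
  | [] => temp
  | i :: rest =>
      if (PySem.List.pyGetD temp (i - 1) ("", 0)).2 == (PySem.List.pyGetD ad i ("", 0)).2 then
        solutionTempLoop ad (temp ++ [PySem.List.pyGetD ad i ("", 0)]) rest
      else temp

def solution (answers : List Int) : List Int :=
  let result_list : List Int := []
  let first_student : List Int := [1, 2, 3, 4, 5]
  let second_student : List Int := [2, 1, 2, 3, 2, 4, 2, 5]
  let third_student : List Int := [3, 3, 1, 1, 2, 2, 4, 4, 5, 5]
  -- the three sequential ifs update one/two/three independently (indices always in range, default unused)
  let s := (PySem.List.pyRange 0 (PySem.List.len answers) 1).foldl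
    (fun (s : Int × Int × Int) answer =>
      (if PySem.List.pyGetD answers answer 0 ==
            PySem.List.pyGetD first_student (PySem.Int.mod (answer + 5) 5) 0 then s.1 + 1 else s.1,
       if PySem.List.pyGetD answers answer 0 ==
            PySem.List.pyGetD second_student (PySem.Int.mod (answer + 8) 8) 0 then s.2.1 + 1 else s.2.1,
       if PySem.List.pyGetD answers answer 0 ==
            PySem.List.pyGetD third_student (PySem.Int.mod (answer + 10) 10) 0 then s.2.2 + 1 else s.2.2))
    (0, 0, 0)
  let answer_dict : List (String × Int) := [("1", s.1), ("2", s.2.1), ("3", s.2.2)]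
  let sortedL := PySem.List.sorted answer_dict (fun x => x.2) true
  if (PySem.List.pyGetD sortedL 0 ("", 0)).2 == 0 then result_list
  else
    let temp := solutionTempLoop sortedL [PySem.List.pyGetD sortedL 0 ("", 0)]
      (PySem.List.pyRange 1 (PySem.List.len sortedL) 1)
    -- int(i[0]): the keys are the decimal literals "1","2","3", so ofStr? always succeeds
    temp.foldl (fun acc i => acc ++ [(PySem.Int.ofStr? i.1).getD 0]) result_list

-- ===== PORT B =====
def solution_alt (answers : List Int) : List Int :=
  -- freq[(i % 40, a)] += 1 over enumerate(answers)
  let freq : PySem.Dict (Int × Int) Int :=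
    (PySem.List.enumerate answers 0).foldl
      (fun d ia =>
        let k : Int × Int := (PySem.Int.mod ia.1 40, ia.2)
        d.insert k (d.getD k 0 + 1))
      PySem.Dict.empty
  let patterns : List (List Int) := [[1, 2, 3, 4, 5], [2, 1, 2, 3, 2, 4, 2, 5],
                                     [3, 3, 1, 1, 2, 2, 4, 4, 5, 5]]
  let scores := patterns.map (fun p =>
    ((PySem.List.pyRange 0 40 1).map (fun r =>
      freq.getD (r, PySem.List.pyGetD p (PySem.Int.mod r (PySem.List.len p)) 0) 0)).sum)
  -- max(scores): scores has three elements, so max? is some and getD's default is unused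
  let best := (PySem.List.max? scores (fun x => x)).getD 0
  if best == 0 then []
  else ((PySem.List.pyRange 0 3 1).filter (fun k => PySem.List.pyGetD scores k 0 == best)).map
    (fun k => k + 1)

-- ===== PRECONDITION & SPEC =====
def Spec_solution (answers : List Int) (out : List Int) : Prop := out = solution_alt answers
instance (answers : List Int) (out : List Int) : Decidable (Spec_solution answers out) := by unfold Spec_solution; infer_instance

-- ===== CLAIM (what is proved, stated in full; the proofs are below) =====
def Claim_equal_solution : Prop := ∀ (answers : List Int), Dom_solution answers → Spec_solution answers (solution answers)

-- ===== LEMMAS AND PROOFS =====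

-- a fold of three independently updated counters is the triple of the three single folds
theorem foldl_triple_count {α : Type} (l : List α) (c1 c2 c3 : α → Bool) (a b c : Int) :
    l.foldl (fun (s : Int × Int × Int) x =>
      (if c1 x then s.1 + 1 else s.1,
       if c2 x then s.2.1 + 1 else s.2.1,
       if c3 x then s.2.2 + 1 else s.2.2)) (a, b, c)
    = (l.foldl (fun t x => if c1 x then t + 1 else t) a,
       l.foldl (fun t x => if c2 x then t + 1 else t) b,
       l.foldl (fun t x => if c3 x then t + 1 else t) c) := by
  induction l generalizing a b c with
  | nil => rfl
  | cons x xs ih => simp only [List.foldl_cons, ih]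

theorem mod5 (j : Int) : PySem.Int.mod (j + 5) 5 = PySem.Int.mod j 5 := by
  simp [PySem.Int.mod]

theorem mod8 (j : Int) : PySem.Int.mod (j + 8) 8 = PySem.Int.mod j 8 := by
  simp [PySem.Int.mod]

theorem mod10 (j : Int) : PySem.Int.mod (j + 10) 10 = PySem.Int.mod j 10 := by
  simp [PySem.Int.mod]

-- mod 40 then mod d is mod d when d divides 40
theorem mod_mod_forty (d : Int) (hd : 0 < d) (hdvd : d ∣ 40) (i : Int) :
    PySem.Int.mod (PySem.Int.mod i 40) d = PySem.Int.mod i d := by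
  simp only [PySem.Int.mod_eq_emod_of_pos hd,
    PySem.Int.mod_eq_emod_of_pos (show (0:Int) < 40 by norm_num)]
  exact Int.emod_emod_of_dvd i hdvd

-- a sum of 0/1 indicators over a duplicate-free list picks out the unique member
theorem sum_ind_not_mem (rs : List Int) (r0 a : Int) (f : Int → Int) (h : r0 ∉ rs) :
    (rs.map (fun r => if (r0, a) = (r, f r) then (1 : Int) else 0)).sum = 0 := by
  induction rs with
  | nil => rfl
  | cons r rs ih =>
      simp only [List.map_cons, List.sum_cons, List.mem_cons, not_or] at *
      rw [if_neg (by rintro ⟨rfl, -⟩; exact h.1 rfl), ih h.2]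
      ring

theorem sum_ind_mem (rs : List Int) (hnd : rs.Nodup) (r0 a : Int) (f : Int → Int)
    (h : r0 ∈ rs) :
    (rs.map (fun r => if (r0, a) = (r, f r) then (1 : Int) else 0)).sum
      = if a = f r0 then 1 else 0 := by
  induction rs with
  | nil => cases h
  | cons r rs ih =>
      rcases List.mem_cons.1 h with hEq | hmem
      · subst hEq
        rw [List.map_cons, List.sum_cons,
          sum_ind_not_mem rs r0 a f (List.nodup_cons.1 hnd).1, add_zero]
        by_cases ha : a = f r0
        · rw [if_pos (by rw [ha]), if_pos ha]
        · rw [if_neg (fun h' => ha (congrArg Prod.snd h')), if_neg ha]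
      · have hne : r0 ≠ r := fun hE => (List.nodup_cons.1 hnd).1 (hE ▸ hmem)
        have hhead : (if (r0, a) = (r, f r) then (1 : Int) else 0) = 0 :=
          if_neg (fun h' => hne (congrArg Prod.fst h'))
        rw [List.map_cons, List.sum_cons, hhead, zero_add]
        exact ih (List.nodup_cons.1 hnd).2 hmem

-- summing the residue-keyed counts over r = 0..39 recovers the plain match count
theorem key_sum (L : List (Int × Int)) (f : Int → Int)
    (hf : ∀ i : Int, f (PySem.Int.mod i 40) = f i) :
    ((PySem.List.pyRange 0 40 1).map (fun r =>
      (((L.map (fun ia => (PySem.Int.mod ia.1 40, ia.2))).count (r, f r) : Int)))).sum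
      = (L.countP (fun ia => ia.2 == f ia.1) : Int) := by
  induction L with
  | nil => simp
  | cons ia L ih =>
      have hcnt : ∀ r : Int,
          (((ia :: L).map (fun ia => (PySem.Int.mod ia.1 40, ia.2))).count (r, f r) : Int)
            = ((L.map (fun ia => (PySem.Int.mod ia.1 40, ia.2))).count (r, f r) : Int)
              + (if (PySem.Int.mod ia.1 40, ia.2) = (r, f r) then (1 : Int) else 0) := by
        intro r
        simp only [List.map_cons, List.count_cons, beq_iff_eq]
        split <;> push_cast <;> ring
      simp only [hcnt]
      rw [PySem.List.sum_map_add_int, ih]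
      have hmem : PySem.Int.mod ia.1 40 ∈ PySem.List.pyRange 0 40 1 := by
        rw [PySem.List.mem_pyRange_one,
          PySem.Int.mod_eq_emod_of_pos (show (0:Int) < 40 by norm_num)]
        exact ⟨Int.emod_nonneg _ (by norm_num), Int.emod_lt_of_pos _ (by norm_num)⟩
      rw [sum_ind_mem _ (PySem.List.nodup_pyRange_one 0 40) _ _ _ hmem, hf]
      simp only [List.countP_cons]
      by_cases hb : ia.2 = f ia.1
      · simp only [hb, if_pos, beq_self_eq_true]
        push_cast
        ring
      · simp only [hb, if_neg, beq_iff_eq, if_false]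
        push_cast [hb]
        ring

-- B's 40-lookup score of a pattern equals A's per-element match count
theorem score_eq (answers p : List Int) (d : Int) (hd : 0 < d) (hdvd : d ∣ 40)
    (hlen : PySem.List.len p = d) :
    ((PySem.List.pyRange 0 40 1).map (fun r =>
      (PySem.Dict.getD ((PySem.List.enumerate answers 0).foldl
        (fun dd ia =>
          dd.insert (PySem.Int.mod ia.1 40, ia.2)
            (dd.getD (PySem.Int.mod ia.1 40, ia.2) 0 + 1))
        (PySem.Dict.empty : PySem.Dict (Int × Int) Int))
        (r, PySem.List.pyGetD p (PySem.Int.mod r (PySem.List.len p)) 0) 0))).sum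
    = (PySem.List.pyRange 0 (PySem.List.len answers) 1).foldl
        (fun t i => if PySem.List.pyGetD answers i 0 ==
          PySem.List.pyGetD p (PySem.Int.mod i d) 0 then t + 1 else t) 0 := by
  have hfold :
      (PySem.List.enumerate answers 0).foldl
        (fun dd ia =>
          dd.insert (PySem.Int.mod ia.1 40, ia.2)
            (dd.getD (PySem.Int.mod ia.1 40, ia.2) 0 + 1))
        (PySem.Dict.empty : PySem.Dict (Int × Int) Int)
      = ((PySem.List.enumerate answers 0).map
          (fun ia => (PySem.Int.mod ia.1 40, ia.2))).foldl
          (fun dd k => dd.insert k (dd.getD k 0 + 1)) PySem.Dict.empty := by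
    rw [List.foldl_map]
  rw [hfold, hlen]
  have hgetD : ∀ r : Int,
      PySem.Dict.getD (((PySem.List.enumerate answers 0).map
          (fun ia => (PySem.Int.mod ia.1 40, ia.2))).foldl
          (fun dd k => dd.insert k (dd.getD k 0 + 1))
          (PySem.Dict.empty : PySem.Dict (Int × Int) Int))
        (r, PySem.List.pyGetD p (PySem.Int.mod r d) 0) 0
      = (((PySem.List.enumerate answers 0).map
          (fun ia => (PySem.Int.mod ia.1 40, ia.2))).count
          (r, PySem.List.pyGetD p (PySem.Int.mod r d) 0) : Int) := by
    intro r
    rw [PySem.Dict.getD_foldl_insert_add_one]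
    rw [show PySem.Dict.getD (PySem.Dict.empty (κ := Int × Int) (ν := Int))
      (r, PySem.List.pyGetD p (PySem.Int.mod r d) 0) 0 = 0 from rfl, zero_add]
  rw [funext hgetD]
  rw [key_sum _ (fun r => PySem.List.pyGetD p (PySem.Int.mod r d) 0)
      (fun i => by simp only [mod_mod_forty d hd hdvd])]
  rw [PySem.List.enumerate_eq_map_pyRange answers 0]
  rw [List.countP_map]
  rw [PySem.List.foldl_if_add_one
      (p := fun i => PySem.List.pyGetD answers i 0 ==
        PySem.List.pyGetD p (PySem.Int.mod i d) 0)]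
  simp only [Function.comp_def, zero_add]

-- the tail of A after the counting loop, as a function of the three scores
def finishA (a b c : Int) : List Int :=
  let sortedL := PySem.List.sorted [("1", a), ("2", b), ("3", c)] (fun x : String × Int => x.2) true
  if (PySem.List.pyGetD sortedL 0 ("", 0)).2 == 0 then []
  else
    let temp := solutionTempLoop sortedL [PySem.List.pyGetD sortedL 0 ("", 0)]
      (PySem.List.pyRange 1 (PySem.List.len sortedL) 1)
    temp.foldl (fun acc i => acc ++ [(PySem.Int.ofStr? i.1).getD 0]) []

-- the tail of B, as a function of the three scores
def finishB (a b c : Int) : List Int :=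
  let best := (PySem.List.max? [a, b, c] (fun x => x)).getD 0
  if best == 0 then []
  else ((PySem.List.pyRange 0 3 1).filter (fun k => PySem.List.pyGetD [a, b, c] k 0 == best)).map
    (fun k => k + 1)

theorem finish_eq (a b c : Int) : finishA a b c = finishB a b c := by
  unfold finishA finishB
  rw [PySem.List.sorted_rev_eq_foldl_insertBy]
  simp only [List.foldl_cons, List.foldl_nil]
  rw [show PySem.List.pyRange 0 3 1 = [0, 1, 2] from by decide]
  simp only [PySem.List.max?_id_cons, List.foldl_cons, List.foldl_nil, Option.getD_some]
  by_cases h1 : a < b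
  · by_cases h2 : b < c
    · rw [show PySem.List.insertBy (fun a b => decide (b.2 < a.2)) ("3", c) (PySem.List.insertBy (fun a b => decide (b.2 < a.2)) ("2", b) (PySem.List.insertBy (fun a b => decide (b.2 < a.2)) ("1", a) [])) = [("3", c), ("2", b), ("1", a)] from by simp [PySem.List.insertBy, h1, h2]]
      rw [show max (max a b) c = c from by omega]
      norm_num [solutionTempLoop, PySem.List.pyGetD, PySem.List.pyGet?, PySem.List.pyIdx?,
        PySem.List.len, show PySem.List.pyRange 1 3 1 = [1, 2] from by decide,
        show Int.toNat 2 = 2 from rfl, List.filter]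
      split_ifs <;> simp_all [List.filter] <;> (try omega) <;> (repeat' split) <;>
        simp_all [show (PySem.Int.ofStr? "1").getD 0 = 1 from by decide,
          show (PySem.Int.ofStr? "2").getD 0 = 2 from by decide,
          show (PySem.Int.ofStr? "3").getD 0 = 3 from by decide] <;> omega
    · by_cases h3 : a < c
      · rw [show PySem.List.insertBy (fun a b => decide (b.2 < a.2)) ("3", c) (PySem.List.insertBy (fun a b => decide (b.2 < a.2)) ("2", b) (PySem.List.insertBy (fun a b => decide (b.2 < a.2)) ("1", a) [])) = [("2", b), ("3", c), ("1", a)] from by simp [PySem.List.insertBy, h1, h2, h3]]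
        rw [show max (max a b) c = b from by omega]
        norm_num [solutionTempLoop, PySem.List.pyGetD, PySem.List.pyGet?, PySem.List.pyIdx?,
          PySem.List.len, show PySem.List.pyRange 1 3 1 = [1, 2] from by decide,
          show Int.toNat 2 = 2 from rfl, List.filter]
        split_ifs <;> simp_all [List.filter] <;> (try omega) <;> (repeat' split) <;>
          simp_all [show (PySem.Int.ofStr? "1").getD 0 = 1 from by decide,
            show (PySem.Int.ofStr? "2").getD 0 = 2 from by decide,
            show (PySem.Int.ofStr? "3").getD 0 = 3 from by decide] <;> omega
      · rw [show PySem.List.insertBy (fun a b => decide (b.2 < a.2)) ("3", c) (PySem.List.insertBy (fun a b => decide (b.2 < a.2)) ("2", b) (PySem.List.insertBy (fun a b => decide (b.2 < a.2)) ("1", a) [])) = [("2", b), ("1", a), ("3", c)] from by simp [PySem.List.insertBy, h1, h2, h3]]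
        rw [show max (max a b) c = b from by omega]
        norm_num [solutionTempLoop, PySem.List.pyGetD, PySem.List.pyGet?, PySem.List.pyIdx?,
          PySem.List.len, show PySem.List.pyRange 1 3 1 = [1, 2] from by decide,
          show Int.toNat 2 = 2 from rfl, List.filter]
        split_ifs <;> simp_all [List.filter] <;> (try omega) <;> (repeat' split) <;>
          simp_all [show (PySem.Int.ofStr? "1").getD 0 = 1 from by decide,
            show (PySem.Int.ofStr? "2").getD 0 = 2 from by decide,
            show (PySem.Int.ofStr? "3").getD 0 = 3 from by decide] <;> omega
  · by_cases h2 : a < c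
    · rw [show PySem.List.insertBy (fun a b => decide (b.2 < a.2)) ("3", c) (PySem.List.insertBy (fun a b => decide (b.2 < a.2)) ("2", b) (PySem.List.insertBy (fun a b => decide (b.2 < a.2)) ("1", a) [])) = [("3", c), ("1", a), ("2", b)] from by simp [PySem.List.insertBy, h1, h2]]
      rw [show max (max a b) c = c from by omega]
      norm_num [solutionTempLoop, PySem.List.pyGetD, PySem.List.pyGet?, PySem.List.pyIdx?,
        PySem.List.len, show PySem.List.pyRange 1 3 1 = [1, 2] from by decide,
        show Int.toNat 2 = 2 from rfl, List.filter]
      split_ifs <;> simp_all [List.filter] <;> (try omega) <;> (repeat' split) <;>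
        simp_all [show (PySem.Int.ofStr? "1").getD 0 = 1 from by decide,
          show (PySem.Int.ofStr? "2").getD 0 = 2 from by decide,
          show (PySem.Int.ofStr? "3").getD 0 = 3 from by decide] <;> omega
    · by_cases h3 : b < c
      · rw [show PySem.List.insertBy (fun a b => decide (b.2 < a.2)) ("3", c) (PySem.List.insertBy (fun a b => decide (b.2 < a.2)) ("2", b) (PySem.List.insertBy (fun a b => decide (b.2 < a.2)) ("1", a) [])) = [("1", a), ("3", c), ("2", b)] from by simp [PySem.List.insertBy, h1, h2, h3]]
        rw [show max (max a b) c = a from by omega]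
        norm_num [solutionTempLoop, PySem.List.pyGetD, PySem.List.pyGet?, PySem.List.pyIdx?,
          PySem.List.len, show PySem.List.pyRange 1 3 1 = [1, 2] from by decide,
          show Int.toNat 2 = 2 from rfl, List.filter]
        split_ifs <;> simp_all [List.filter] <;> (try omega) <;> (repeat' split) <;>
          simp_all [show (PySem.Int.ofStr? "1").getD 0 = 1 from by decide,
            show (PySem.Int.ofStr? "2").getD 0 = 2 from by decide,
            show (PySem.Int.ofStr? "3").getD 0 = 3 from by decide] <;> omega
      · rw [show PySem.List.insertBy (fun a b => decide (b.2 < a.2)) ("3", c) (PySem.List.insertBy (fun a b => decide (b.2 < a.2)) ("2", b) (PySem.List.insertBy (fun a b => decide (b.2 < a.2)) ("1", a) [])) = [("1", a), ("2", b), ("3", c)] from by simp [PySem.List.insertBy, h1, h2, h3]]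
        rw [show max (max a b) c = a from by omega]
        norm_num [solutionTempLoop, PySem.List.pyGetD, PySem.List.pyGet?, PySem.List.pyIdx?,
          PySem.List.len, show PySem.List.pyRange 1 3 1 = [1, 2] from by decide,
          show Int.toNat 2 = 2 from rfl, List.filter]
        split_ifs <;> simp_all [List.filter] <;> (try omega) <;> (repeat' split) <;>
          simp_all [show (PySem.Int.ofStr? "1").getD 0 = 1 from by decide,
            show (PySem.Int.ofStr? "2").getD 0 = 2 from by decide,
            show (PySem.Int.ofStr? "3").getD 0 = 3 from by decide] <;> omega

-- ===== VERDICT (by name: the statement is the Claim_ definition above) =====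
theorem solution_spec : Claim_equal_solution := by
  intro answers _
  unfold Spec_solution
  show solution answers = solution_alt answers
  simp only [solution, solution_alt, List.map_cons, List.map_nil]
  rw [foldl_triple_count]
  simp only [mod5, mod8, mod10]
  rw [score_eq answers _ 5 (by norm_num) (by norm_num) (by decide),
    score_eq answers _ 8 (by norm_num) (by norm_num) (by decide),
    score_eq answers _ 10 (by norm_num) (by norm_num) (by decide)]
  exact finish_eq _ _ _
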